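-- pv_equiv track=rewrite | github.com/EmanuelML64/ayed-2025-tps | TP3/# TP 3 ejercicio 2.py | matriz_e
-- ===== SOURCE A (Python) =====
-- def matriz_e(N:int)->list[list]:
--     '''Genera una matriz intercalando numeros con un cero entremedio.
--     Precondiciones: numero entero para determinar las dimensiones de la matriz.
--     Poscondiciones: devuelve una matriz con numeros intercalados por el cero.'''
--     m = [[0]*N for _ in range(N)]
--     cnt = 1
--     for i in range(N):
--         for j in range(N):
--             if (i + j) % 2 == 1:
--                 m[i][j] = cnt
--                 cnt += 1
--     return m
-- ===== SOURCE B (Python) =====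
-- def matriz_e(N: int) -> list[list]:
--     '''Row-by-row construction: for each row compute the first odd-parity
--     column and how many odd cells the row has, then fill them in one
--     slice assignment instead of testing every cell.'''
--     m = []
--     cnt = 1
--     for i in range(N):
--         start = 1 if i % 2 == 0 else 0
--         count = (N - start + 1) // 2
--         row = [0] * N
--         row[start::2] = range(cnt, cnt + count)
--         m.append(row)
--         cnt += count
--     return m
-- ===== Notes on version B (the rewrite author's own statement) =====
-- stated objective: alternative
-- what changed: B fills the matrix row by row: it computes the first odd-parity column and the number of odd cells per row arithmetically and writes them with one slice assignment, instead of visiting every cell and testing (i+j)%2.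
import Mathlib
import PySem

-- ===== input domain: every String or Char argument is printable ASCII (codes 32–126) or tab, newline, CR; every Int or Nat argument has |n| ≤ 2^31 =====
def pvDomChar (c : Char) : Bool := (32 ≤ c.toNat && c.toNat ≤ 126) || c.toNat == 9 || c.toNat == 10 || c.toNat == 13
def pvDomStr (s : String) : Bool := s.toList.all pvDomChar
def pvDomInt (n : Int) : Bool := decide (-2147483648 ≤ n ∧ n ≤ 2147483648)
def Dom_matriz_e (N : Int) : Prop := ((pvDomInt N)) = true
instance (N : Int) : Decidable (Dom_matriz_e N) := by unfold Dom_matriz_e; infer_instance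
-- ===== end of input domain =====

-- B builds the matrix row by row (first odd column + a counted slice fill) instead of
-- testing every cell; objective: simpler per-row arithmetic, same exact output.

-- ===== PORT A =====
-- literal port: m = [[0]*N for _ in range(N)] ([0]*N = replicate, empty for N ≤ 0),
-- then the nested loops mutate (m, cnt); mutation is threaded as fold state.
def matriz_e (N : Int) : List (List Int) :=
  let m := (PySem.List.pyRange 0 N 1).map (fun _ => List.replicate N.toNat 0)
  let st := (PySem.List.pyRange 0 N 1).foldl (fun st i =>
      (PySem.List.pyRange 0 N 1).foldl (fun (st : List (List Int) × Int) j =>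
        if PySem.Int.mod (i + j) 2 = 1 then
          (PySem.List.pySetD st.1 i (PySem.List.pySetD (PySem.List.pyGetD st.1 i []) j st.2), st.2 + 1)
        else st) st) (m, 1)
  st.1

-- ===== PORT B =====
-- hand port of the slice assignment row[s::2] = xs (lengths match in B):
-- replaces positions s, s+2, s+4, … of the row by the elements of xs in order.
def setStep2 : List Int → Nat → List Int → List Int
  | [], _, _ => []
  | r :: rs, s+1, xs => r :: setStep2 rs s xs
  | _ :: rs, 0, x :: xs => x :: setStep2 rs 1 xs
  | r :: rs, 0, [] => r :: rs

def matriz_e_alt (N : Int) : List (List Int) :=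
  ((PySem.List.pyRange 0 N 1).foldl (fun (st : List (List Int) × Int) i =>
      let start : Int := if PySem.Int.mod i 2 = 0 then 1 else 0
      let count := PySem.Int.floordiv (N - start + 1) 2
      let row := setStep2 (List.replicate N.toNat 0) start.toNat
                   (PySem.List.pyRange st.2 (st.2 + count) 1)
      (st.1 ++ [row], st.2 + count)) ([], 1)).1

-- ===== PRECONDITION & SPEC =====
def Spec_matriz_e (N : Int) (out : List (List Int)) : Prop := out = matriz_e_alt N
instance (N : Int) (out : List (List Int)) : Decidable (Spec_matriz_e N out) := by unfold Spec_matriz_e; infer_instance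

-- ===== CLAIM (what is proved, stated in full; the proofs are below) =====
def Claim_equal_matriz_e : Prop := ∀ (N : Int), Dom_matriz_e N → Spec_matriz_e N (matriz_e N)

-- ===== LEMMAS AND PROOFS =====

-- common spec of one row: rowF n b c = (the row of length n whose cells of the
-- parity marked by b get c, c+1, …, and the final counter)
def rowF : Nat → Bool → Int → List Int × Int
  | 0, _, c => ([], c)
  | n+1, true, c => let p := rowF n false (c+1); (c :: p.1, p.2)
  | n+1, false, c => let p := rowF n true c; (0 :: p.1, p.2)

def bodd (x : Int) : Bool := decide (PySem.Int.mod x 2 = 1)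

lemma bodd_succ (x : Int) : bodd (x + 1) = !bodd x := by
  simp only [bodd, PySem.Int.mod_eq_emod_of_pos (by norm_num : (0:Int) < 2)]
  by_cases h : x % 2 = 1 <;> simp [h] <;> omega

lemma set_append_len (xs : List Int) (y : Int) (ys : List Int) (v : Int) :
    (xs ++ y :: ys).set xs.length v = xs ++ v :: ys := by
  induction xs with
  | nil => simp
  | cons a as ih => simp [ih]

lemma setM_append_len (xs : List (List Int)) (y : List Int) (ys : List (List Int)) (v : List Int) :
    (xs ++ y :: ys).set xs.length v = xs ++ v :: ys := by
  induction xs with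
  | nil => simp
  | cons a as ih => simp [ih]

lemma getD_append_len (xs : List (List Int)) (y : List Int) (ys : List (List Int)) :
    (xs ++ y :: ys).getD xs.length [] = y := by
  induction xs with
  | nil => simp
  | cons a as ih => simpa using ih

-- the row-level inner loop of A equals rowF
lemma innerA_row (i : Int) (n : Nat) :
    ∀ (k : Nat) (r0 : List Int) (c : Int), r0.length + k = n →
    (PySem.List.pyRange (r0.length : Int) (n : Int) 1).foldl
      (fun (st : List Int × Int) j =>
        if PySem.Int.mod (i + j) 2 = 1 then (PySem.List.pySetD st.1 j st.2, st.2 + 1) else st)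
      (r0 ++ List.replicate k 0, c)
    = (r0 ++ (rowF k (bodd (i + r0.length)) c).1, (rowF k (bodd (i + r0.length)) c).2) := by
  intro k
  induction k with
  | zero =>
    intro r0 c h
    rw [PySem.List.pyRange_one_eq_nil (by omega)]
    simp [rowF]
  | succ k ih =>
    intro r0 c h
    rw [PySem.List.pyRange_one_cons (by exact_mod_cast (by omega : r0.length < n))]
    simp only [List.foldl_cons, List.replicate_succ]
    by_cases hb : PySem.Int.mod (i + (r0.length : Int)) 2 = 1
    · have hb' : bodd (i + (r0.length : Int)) = true := by
        simp only [bodd, decide_eq_true_eq]; exact hb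
      rw [if_pos hb]
      have hset : PySem.List.pySetD (r0 ++ 0 :: List.replicate k 0) (r0.length : Int) c
          = r0 ++ c :: List.replicate k 0 := by
        rw [PySem.List.pySetD_natCast, set_append_len]
      rw [hset]
      have := ih (r0 ++ [c]) (c + 1) (by simp; omega)
      simp only [List.length_append, List.length_cons, List.length_nil, Nat.add_zero,
        List.append_assoc, List.cons_append, List.nil_append] at this ⊢
      rw [show ((r0.length + 1 : Nat) : Int) = (r0.length : Int) + 1 by push_cast; ring] at this
      rw [this, show i + ((r0.length : Int) + 1) = (i + r0.length) + 1 by ring, bodd_succ, hb']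
      simp [rowF, hb']
    · have hb' : bodd (i + (r0.length : Int)) = false := by
        simp only [bodd, decide_eq_false_iff_not]; exact hb
      rw [if_neg hb]
      have : r0 ++ 0 :: List.replicate k 0 = (r0 ++ [(0:Int)]) ++ List.replicate k 0 := by simp
      rw [this]
      have := ih (r0 ++ [0]) c (by simp; omega)
      simp only [List.length_append, List.length_cons, List.length_nil, Nat.add_zero,
        List.append_assoc, List.cons_append, List.nil_append] at this ⊢
      rw [show ((r0.length + 1 : Nat) : Int) = (r0.length : Int) + 1 by push_cast; ring] at this
      rw [this, show i + ((r0.length : Int) + 1) = (i + r0.length) + 1 by ring, bodd_succ, hb']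
      simp [rowF, hb']

-- the matrix-level inner loop of A only rewrites row number mB.length
lemma inner_mat (js : List Int) :
    ∀ (mB : List (List Int)) (row : List Int) (rest : List (List Int)) (c : Int),
    js.foldl (fun (st : List (List Int) × Int) j =>
        if PySem.Int.mod ((mB.length : Int) + j) 2 = 1 then
          (PySem.List.pySetD st.1 (mB.length : Int)
             (PySem.List.pySetD (PySem.List.pyGetD st.1 (mB.length : Int) []) j st.2), st.2 + 1)
        else st) (mB ++ row :: rest, c)
    = (mB ++ (js.foldl (fun (st : List Int × Int) j =>
        if PySem.Int.mod ((mB.length : Int) + j) 2 = 1 then (PySem.List.pySetD st.1 j st.2, st.2 + 1) else st)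
        (row, c)).1 :: rest,
       (js.foldl (fun (st : List Int × Int) j =>
        if PySem.Int.mod ((mB.length : Int) + j) 2 = 1 then (PySem.List.pySetD st.1 j st.2, st.2 + 1) else st)
        (row, c)).2) := by
  induction js with
  | nil => intro mB row rest c; simp
  | cons j js ih =>
    intro mB row rest c
    simp only [List.foldl_cons]
    by_cases hb : PySem.Int.mod ((mB.length : Int) + j) 2 = 1
    · rw [if_pos hb, if_pos hb]
      have hget : PySem.List.pyGetD (mB ++ row :: rest) (mB.length : Int) [] = row := by
        rw [PySem.List.pyGetD_natCast]
        exact getD_append_len mB row rest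
      have hset : PySem.List.pySetD (mB ++ row :: rest) (mB.length : Int)
          (PySem.List.pySetD row j c) = mB ++ (PySem.List.pySetD row j c) :: rest := by
        rw [PySem.List.pySetD_natCast, setM_append_len]
      rw [hget, hset, ih]
    · rw [if_neg hb, if_neg hb, ih]

-- how many cells rowF fills
def countI (k : Nat) (b : Bool) : Nat := if b then (k + 1) / 2 else k / 2

lemma rowF_snd : ∀ (k : Nat) (b : Bool) (c : Int), (rowF k b c).2 = c + countI k b := by
  intro k
  induction k with
  | zero => intro b c; simp [rowF, countI]
  | succ k ih =>
    intro b c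
    cases b <;> simp [rowF, ih, countI] <;> push_cast <;> omega

-- B's count expression, as a Nat
lemma count_eq (k s : Nat) (hs : s ≤ 1) :
    PySem.Int.floordiv ((k : Int) - (s : Int) + 1) 2 = ((countI k (s == 0) : Nat) : Int) := by
  rw [PySem.Int.floordiv_eq_ediv_of_pos (by norm_num)]
  interval_cases s <;> simp [countI] <;> omega

-- B's slice-filled row equals rowF's row
lemma rowB_eq : ∀ (k : Nat) (s : Nat) (c : Int), s ≤ 1 →
    setStep2 (List.replicate k 0) s (PySem.List.pyRange c (c + ((countI k (s == 0) : Nat) : Int)) 1)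
    = (rowF k (s == 0) c).1 := by
  intro k
  induction k with
  | zero =>
    intro s c hs
    simp [rowF, setStep2.eq_def]
  | succ k ih =>
    intro s c hs
    interval_cases s
    · have hcnt : (countI (k+1) (0 == 0) : Int) = (countI k (1 == 0) : Int) + 1 := by
        simp [countI]; push_cast; omega
      rw [hcnt, PySem.List.pyRange_one_cons (by omega)]
      simp only [List.replicate_succ, setStep2]
      have : c + ((countI k (1 == 0) : Nat) : Int) + 1 = (c + 1) + ((countI k (1 == 0) : Nat) : Int) := by ring
      rw [show c + (((countI k (1 == 0) : Nat) : Int) + 1) = (c + 1) + ((countI k (1 == 0) : Nat) : Int) by ring]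
      rw [ih 1 (c + 1) (by omega)]
      simp [rowF]
    · have hcnt : (countI (k+1) (1 == 0) : Nat) = (countI k (0 == 0) : Nat) := by
        simp [countI]
      rw [hcnt]
      simp only [List.replicate_succ, setStep2]
      rw [ih 0 c (by omega)]
      simp [rowF]

-- one full step of A's outer loop (inner loop over row i = mB.length) vs rowF
lemma stepA_eq (n : Nat) (mB : List (List Int)) (rest : List (List Int)) (c : Int) :
    (PySem.List.pyRange 0 (n : Int) 1).foldl
      (fun (st : List (List Int) × Int) j =>
        if PySem.Int.mod ((mB.length : Int) + j) 2 = 1 then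
          (PySem.List.pySetD st.1 (mB.length : Int)
             (PySem.List.pySetD (PySem.List.pyGetD st.1 (mB.length : Int) []) j st.2), st.2 + 1)
        else st) (mB ++ (List.replicate n 0) :: rest, c)
    = (mB ++ (rowF n (bodd (mB.length : Int)) c).1 :: rest,
       (rowF n (bodd (mB.length : Int)) c).2) := by
  rw [inner_mat]
  have h := innerA_row ((mB.length : Int)) n n ([] : List Int) c (by simp)
  simp only [List.length_nil, Nat.cast_zero, List.nil_append, add_zero] at h
  rw [h]

-- one full step of B's outer loop vs rowF
lemma stepB_eq (n : Nat) (mB : List (List Int)) (c : Int) :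
    (mB ++ [setStep2 (List.replicate n 0)
        (if PySem.Int.mod (mB.length : Int) 2 = 0 then (1:Int) else 0).toNat
        (PySem.List.pyRange c
          (c + PySem.Int.floordiv ((n : Int) - (if PySem.Int.mod (mB.length : Int) 2 = 0 then (1:Int) else 0) + 1) 2) 1)],
     c + PySem.Int.floordiv ((n : Int) - (if PySem.Int.mod (mB.length : Int) 2 = 0 then (1:Int) else 0) + 1) 2)
    = (mB ++ [(rowF n (bodd (mB.length : Int)) c).1],
       (rowF n (bodd (mB.length : Int)) c).2) := by
  have hmod : PySem.Int.mod (mB.length : Int) 2 = (mB.length : Int) % 2 :=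
    PySem.Int.mod_eq_emod_of_pos (by norm_num)
  by_cases hb : PySem.Int.mod (mB.length : Int) 2 = 1
  · have hb' : bodd (mB.length : Int) = true := by
      simp only [bodd, decide_eq_true_eq]; exact hb
    have hne : ¬ PySem.Int.mod (mB.length : Int) 2 = 0 := by rw [hb]; norm_num
    rw [if_neg hne, hb']
    have hc : PySem.Int.floordiv ((n : Int) - 0 + 1) 2 = ((countI n true : Nat) : Int) := by
      have := count_eq n 0 (by omega)
      simpa using this
    rw [hc]
    have hrow := rowB_eq n 0 c (by omega)
    norm_num at hrow
    rw [show (0:Int).toNat = 0 by rfl, hrow, rowF_snd]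
  · have hb' : bodd (mB.length : Int) = false := by
      simp only [bodd, decide_eq_false_iff_not]; exact hb
    have heq : PySem.Int.mod (mB.length : Int) 2 = 0 := by rw [hmod] at hb ⊢; omega
    rw [if_pos heq, hb']
    have hc : PySem.Int.floordiv ((n : Int) - 1 + 1) 2 = ((countI n false : Nat) : Int) := by
      have := count_eq n 1 (by omega)
      simpa using this
    rw [hc]
    have hrow := rowB_eq n 1 c (by omega)
    simp only [show ((1:Nat) == 0) = false from rfl] at hrow
    rw [show (1:Int).toNat = 1 by rfl, hrow, rowF_snd]

-- A's outer loop starting at row mB.length on untouched zero rows equals B's outer loop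
lemma outer_eq (n : Nat) : ∀ (k : Nat) (mB : List (List Int)) (c : Int), mB.length + k = n →
    (PySem.List.pyRange (mB.length : Int) (n : Int) 1).foldl
      (fun (st : List (List Int) × Int) i =>
        (PySem.List.pyRange 0 (n : Int) 1).foldl
          (fun (st : List (List Int) × Int) j =>
            if PySem.Int.mod (i + j) 2 = 1 then
              (PySem.List.pySetD st.1 i
                 (PySem.List.pySetD (PySem.List.pyGetD st.1 i []) j st.2), st.2 + 1)
            else st) st)
      (mB ++ List.replicate k (List.replicate n 0), c)
    = (PySem.List.pyRange (mB.length : Int) (n : Int) 1).foldl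
      (fun (st : List (List Int) × Int) i =>
        (st.1 ++ [setStep2 (List.replicate n 0)
            (if PySem.Int.mod i 2 = 0 then (1:Int) else 0).toNat
            (PySem.List.pyRange st.2
              (st.2 + PySem.Int.floordiv ((n : Int) - (if PySem.Int.mod i 2 = 0 then (1:Int) else 0) + 1) 2) 1)],
         st.2 + PySem.Int.floordiv ((n : Int) - (if PySem.Int.mod i 2 = 0 then (1:Int) else 0) + 1) 2))
      (mB, c) := by
  intro k
  induction k with
  | zero =>
    intro mB c h
    rw [show PySem.List.pyRange ((mB.length : Nat) : Int) (n : Int) 1 = []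
        from PySem.List.pyRange_one_eq_nil (by omega)]
    simp
  | succ k ih =>
    intro mB c h
    rw [show PySem.List.pyRange ((mB.length : Nat) : Int) (n : Int) 1
          = ((mB.length : Nat) : Int) :: PySem.List.pyRange (((mB.length : Nat) : Int) + 1) (n : Int) 1
        from PySem.List.pyRange_one_cons (by omega)]
    simp only [List.foldl_cons, List.replicate_succ]
    rw [stepA_eq n mB (List.replicate k (List.replicate n 0)) c, stepB_eq n mB c]
    have : mB ++ (rowF n (bodd (mB.length : Int)) c).1 :: List.replicate k (List.replicate n 0)
        = (mB ++ [(rowF n (bodd (mB.length : Int)) c).1]) ++ List.replicate k (List.replicate n 0) := by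
      simp
    rw [this]
    have hlen : ((mB.length : Int) + 1) = (((mB ++ [(rowF n (bodd (mB.length : Int)) c).1]).length : Nat) : Int) := by
      simp
    rw [hlen]
    exact ih (mB ++ [(rowF n (bodd (mB.length : Int)) c).1]) ((rowF n (bodd (mB.length : Int)) c).2) (by simp; omega)

-- ===== VERDICT (by name: the statement is the Claim_ definition above) =====
theorem matriz_e_spec : Claim_equal_matriz_e := by
  intro N _
  unfold Spec_matriz_e
  by_cases hN : N ≤ 0
  · simp [matriz_e, matriz_e_alt, PySem.List.pyRange_one_eq_nil hN]
  · obtain ⟨n, rfl⟩ : ∃ n : Nat, N = (n : Int) :=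
      ⟨N.toNat, (Int.toNat_of_nonneg (by omega)).symm⟩
    simp only [matriz_e, matriz_e_alt, Int.toNat_natCast]
    have hm : (PySem.List.pyRange 0 (n:Int) 1).map (fun _ => List.replicate n (0:Int))
        = List.replicate n (List.replicate n 0) := by
      rw [List.map_const']
      congr 1
      simpa using PySem.List.length_pyRange_one 0 (n:Int)
    rw [hm]
    have h := outer_eq n n [] 1 (by simp)
    simp only [List.length_nil, Nat.cast_zero, List.nil_append] at h
    rw [h]
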